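-- pv_equiv track=rewrite | github.com/Roit15/PNR_Tracker | scraper.py | extract_status_detail
-- ===== SOURCE A (Python) =====
-- def extract_status_detail(text, keyword):
--     """Extract detail text around a status keyword."""
--     lines = text.split('\n')
--     relevant = []
--     for i, line in enumerate(lines):
--         if keyword.lower() in line.lower():
--             start = max(0, i - 1)
--             end = min(len(lines), i + 3)
--             relevant.extend(lines[start:end])
--     return ' | '.join(relevant).strip() if relevant else keyword.capitalize()
-- ===== SOURCE B (Python) =====
-- def extract_status_detail(text, keyword):
--     """Extract detail text around a status keyword."""
--     lines = text.split('\n')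
--     kw = keyword.lower()
--     # Sliding 4-line window built by zipping shifted copies of the line list
--     # (None marks a missing neighbour); no indices, no slices, no max/min.
--     prevs = [None] + lines[:-1]
--     nxt1 = lines[1:] + [None]
--     nxt2 = lines[2:] + [None, None]
--     relevant = []
--     for p, c, a, b in zip(prevs, lines, nxt1, nxt2):
--         if kw in c.lower():
--             relevant += [x for x in (p, c, a, b) if x is not None]
--     return ' | '.join(relevant).strip() if relevant else keyword.capitalize()
-- ===== Notes on version B (the rewrite author's own statement) =====
-- stated objective: alternative
-- what changed: Replaces A's index-and-slice scan (enumerate, max/min bounds, lines[start:end]) with a sliding 4-line window obtained by zipping the line list with three shifted copies padded by None sentinels; the context of each matching line is read off the zipped tuple with no index arithmetic or slicing.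
import Mathlib
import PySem

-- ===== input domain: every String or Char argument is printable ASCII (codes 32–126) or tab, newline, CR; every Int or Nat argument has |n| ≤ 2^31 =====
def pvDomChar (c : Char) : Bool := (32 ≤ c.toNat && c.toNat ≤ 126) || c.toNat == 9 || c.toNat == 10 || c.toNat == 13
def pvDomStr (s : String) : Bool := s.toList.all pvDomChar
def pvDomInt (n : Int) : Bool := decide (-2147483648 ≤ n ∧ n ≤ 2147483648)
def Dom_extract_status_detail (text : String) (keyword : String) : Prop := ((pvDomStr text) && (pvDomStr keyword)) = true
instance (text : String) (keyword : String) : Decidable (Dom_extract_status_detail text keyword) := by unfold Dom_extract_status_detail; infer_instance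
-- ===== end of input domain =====

-- B replaces A's index-and-slice scan with a sliding 4-line window read off a zip of
-- shifted copies of the line list (Option sentinels for missing neighbours); same cost.

-- ===== PORT A =====
-- shared helper: Python str.capitalize() (exact on ASCII: first char uppercased, rest lowercased)
def pyCapitalize (s : String) : String :=
  match s.toList with
  | [] => ""
  | c :: rest => String.ofList (PySem.Chars.upperChar c :: PySem.Chars.lower rest)

def extract_status_detail (text : String) (keyword : String) : String :=
  let lines := (PySem.Str.split? text "\n").getD []  -- split? is some here (sep ≠ "")
  let relevant := (PySem.List.enumerate lines 0).foldl
    (fun acc p =>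
      if PySem.Str.isIn (PySem.Str.lower keyword) (PySem.Str.lower p.2) then
        acc ++ PySem.List.slice lines (some (max 0 (p.1 - 1)))
          (some (min (PySem.List.len lines) (p.1 + 3)))
      else acc) []
  if relevant ≠ [] then PySem.Str.strip (PySem.Str.join " | " relevant)
  else pyCapitalize keyword

-- ===== PORT B =====
-- Python's lists mixing strings and None become List (Option String): [None] ++ lines[:-1]
-- is [none] ++ (lines[:-1]).map some, and 'x is not None' filtering is filterMap id.
def extract_status_detail_alt (text : String) (keyword : String) : String :=
  let lines := (PySem.Str.split? text "\n").getD []  -- split? is some here (sep ≠ "")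
  let kw := PySem.Str.lower keyword
  let prevs : List (Option String) := [none] ++ (PySem.List.slice lines none (some (-1))).map some
  let nxt1 : List (Option String) := (PySem.List.slice lines (some 1) none).map some ++ [none]
  let nxt2 : List (Option String) := (PySem.List.slice lines (some 2) none).map some ++ [none, none]
  -- zip(prevs, lines, nxt1, nxt2) as nested pairs ((p, c), (a, b))
  let quad := (prevs.zip lines).zip (nxt1.zip nxt2)
  let relevant := quad.foldl
    (fun acc q =>
      if PySem.Str.isIn kw (PySem.Str.lower q.1.2) then
        acc ++ List.filterMap id [q.1.1, some q.1.2, q.2.1, q.2.2]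
      else acc) []
  if relevant ≠ [] then PySem.Str.strip (PySem.Str.join " | " relevant)
  else pyCapitalize keyword

-- ===== PRECONDITION & SPEC =====
def Spec_extract_status_detail (text : String) (keyword : String) (out : String) : Prop := out = extract_status_detail_alt text keyword
instance (text : String) (keyword : String) (out : String) : Decidable (Spec_extract_status_detail text keyword out) := by unfold Spec_extract_status_detail; infer_instance

-- ===== CLAIM (what is proved, stated in full; the proofs are below) =====
def Claim_equal_extract_status_detail : Prop := ∀ (text : String) (keyword : String), Dom_extract_status_detail text keyword → Spec_extract_status_detail text keyword (extract_status_detail text keyword)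

-- ===== LEMMAS AND PROOFS =====

-- min with the length is redundant as a slice upper bound (clamping does it)
theorem slice_min_len {α : Type} (xs : List α) (a? : Option Int) (b : Int) :
    PySem.List.slice xs a? (some (min (xs.length : Int) b)) = PySem.List.slice xs a? (some b) := by
  have h : PySem.List.clampIdx xs.length (min (xs.length : Int) b)
      = PySem.List.clampIdx xs.length b := by
    simp only [PySem.List.clampIdx]
    split_ifs <;> omega
  cases a? <;> simp [PySem.List.slice, h]

theorem take_opt3 {α : Type} (ys : List α) :
    ys.take 3 = ys[0]?.toList ++ ys[1]?.toList ++ ys[2]?.toList := by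
  rcases ys with _ | ⟨a, _ | ⟨b, _ | ⟨c, t⟩⟩⟩ <;> simp

theorem take_opt4 {α : Type} (ys : List α) :
    ys.take 4 = ys[0]?.toList ++ ys[1]?.toList ++ ys[2]?.toList ++ ys[3]?.toList := by
  rcases ys with _ | ⟨a, _ | ⟨b, _ | ⟨c, _ | ⟨d, t⟩⟩⟩⟩ <;> simp

theorem filterMap_id4 {α : Type} (a b c d : Option α) :
    List.filterMap id [a, b, c, d] = a.toList ++ b.toList ++ c.toList ++ d.toList := by
  cases a <;> cases b <;> cases c <;> cases d <;> simp

-- a shifted copy of ls padded with none sentinels, elementwise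
theorem getElem_shifted {α : Type} (ls : List α) (m i : Nat) (pad : List (Option α))
    (hpad : ∀ o ∈ pad, o = none) (hi : i < ((ls.drop m).map some ++ pad).length) :
    ((ls.drop m).map some ++ pad)[i] = ls[m + i]? := by
  by_cases h : i < ls.length - m
  · rw [List.getElem_append_left (by simp; omega)]
    simp only [List.getElem_map, List.getElem_drop]
    rw [List.getElem?_eq_getElem (by omega)]
  · rw [List.getElem_append_right (by simp; omega)]
    rw [hpad _ (List.getElem_mem _)]
    rw [List.getElem?_eq_none (by omega)]

-- the zipped shifted lists, elementwise: (prev, cur, next1, next2) at position k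
theorem quad_eq (ls : List String) :
    (([none] ++ ls.dropLast.map some).zip ls).zip
      (((ls.drop 1).map some ++ [none]).zip ((ls.drop 2).map some ++ [none, none]))
    = (List.range ls.length).map (fun k =>
        (((if k = 0 then none else some (ls.getD (k - 1) "")), ls.getD k ""),
         (ls[k+1]?, ls[k+2]?))) := by
  apply List.ext_getElem
  · simp [List.length_zip]; omega
  · intro i h1 h2
    have hn : i < ls.length := by
      simp [List.length_zip] at h1; omega
    simp only [List.getElem_zip, List.getElem_map, List.getElem_range]
    refine Prod.ext (Prod.ext ?_ ?_) (Prod.ext ?_ ?_)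
    · rcases i with _ | j
      · simp
      · have hj : j < ls.dropLast.length := by simp; omega
        simp only [List.cons_append, List.nil_append, List.getElem_cons_succ,
          List.getElem_map, List.getElem_dropLast]
        rw [List.getD_eq_getElem ls "" (by omega : j + 1 - 1 < ls.length)]
        simp
    · simp [List.getElem?_eq_getElem hn]
    · rw [getElem_shifted ls 1 i [none] (by simp) (by simp [List.length_zip] at h1 ⊢; omega)]
      rw [Nat.add_comm]
    · rw [getElem_shifted ls 2 i [none, none] (by simp) (by simp [List.length_zip] at h1 ⊢; omega)]
      rw [Nat.add_comm]

-- A's slice window at a valid index is B's option quadruple, flattened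
theorem window_eq (ls : List String) (k : Nat) (hk : k < ls.length) :
    PySem.List.slice ls (some (max 0 ((k : Int) - 1))) (some (min (ls.length : Int) ((k : Int) + 3)))
    = List.filterMap id [(if k = 0 then none else some (ls.getD (k - 1) "")),
        some (ls.getD k ""), ls[k+1]?, ls[k+2]?] := by
  rw [filterMap_id4]
  rcases Nat.eq_zero_or_pos k with hk0 | hk0
  · subst hk0
    simp only [Nat.cast_zero]
    have h1 : max (0 : Int) (0 - 1) = ((0 : Nat) : Int) := by norm_num
    have h2 : (0 : Int) + 3 = ((0 : Nat) : Int) + ((3 : Nat) : Int) := by norm_num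
    rw [h1, slice_min_len, h2, PySem.List.slice_natCast_add ls 0 3]
    simp only [List.drop_zero]
    rw [take_opt3]
    simp [List.getElem?_eq_getElem hk]
  · have h1 : max 0 ((k : Int) - 1) = ((k - 1 : Nat) : Int) := by omega
    have h2 : (k : Int) + 3 = ((k - 1 : Nat) : Int) + ((4 : Nat) : Int) := by omega
    rw [h1, slice_min_len, h2, PySem.List.slice_natCast_add ls (k - 1) 4]
    rw [take_opt4]
    have e0 : k - 1 + 0 = k - 1 := by omega
    have e1 : k - 1 + 1 = k := by omega
    have e2 : k - 1 + 2 = k + 1 := by omega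
    have e3 : k - 1 + 3 = k + 2 := by omega
    simp only [List.getElem?_drop, e0, e1, e2, e3]
    have hk1 : k - 1 < ls.length := by omega
    simp [List.getElem?_eq_getElem hk, List.getElem?_eq_getElem hk1,
      if_neg (by omega : ¬ k = 0)]

-- the two relevant-line lists coincide
set_option maxHeartbeats 1000000 in
theorem rel_eq (ls : List String) (kw : String) :
    (PySem.List.enumerate ls 0).foldl
      (fun acc p =>
        if PySem.Str.isIn (PySem.Str.lower kw) (PySem.Str.lower p.2) then
          acc ++ PySem.List.slice ls (some (max 0 (p.1 - 1)))
            (some (min (PySem.List.len ls) (p.1 + 3)))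
        else acc) []
    = ((([none] ++ (PySem.List.slice ls none (some (-1))).map some).zip ls).zip
        (((PySem.List.slice ls (some 1) none).map some ++ [none]).zip
          ((PySem.List.slice ls (some 2) none).map some ++ [none, none]))).foldl
      (fun (acc : List String) (q : (Option String × String) × (Option String × Option String)) =>
        if PySem.Str.isIn (PySem.Str.lower kw) (PySem.Str.lower q.1.2) then
          acc ++ List.filterMap id [q.1.1, some q.1.2, q.2.1, q.2.2]
        else acc) [] := by
  have hle1 : (0 : Int) ≤ 1 := by norm_num
  have hle2 : (0 : Int) ≤ 2 := by norm_num
  simp only [PySem.List.slice_from _ hle1, PySem.List.slice_from _ hle2,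
    PySem.List.slice_to_neg_one]
  have e1 : (1 : Int).toNat = 1 := rfl
  have e2 : (2 : Int).toNat = 2 := rfl
  rw [e1, e2, PySem.List.enumerate_eq_map_pyRange ls "", quad_eq]
  simp only [PySem.List.len_eq, PySem.List.pyRange_one, Int.sub_zero, Int.toNat_natCast,
    List.map_map, List.foldl_map]
  apply PySem.List.foldl_congr_mem
  intro acc k hkmem
  have hk : k < ls.length := List.mem_range.mp hkmem
  simp only [Function.comp, zero_add, PySem.List.pyGetD_natCast]
  rw [List.getD_eq_getElem ls "" hk]
  by_cases hc : PySem.Str.isIn (PySem.Str.lower kw) (PySem.Str.lower ls[k]) = true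
  · rw [if_pos hc, if_pos hc]
    have hw := window_eq ls k hk
    rw [List.getD_eq_getElem ls "" hk] at hw
    rw [hw]
  · rw [if_neg hc, if_neg hc]

-- ===== VERDICT (by name: the statement is the Claim_ definition above) =====
theorem extract_status_detail_spec : Claim_equal_extract_status_detail := by
  intro text keyword _
  unfold Spec_extract_status_detail extract_status_detail extract_status_detail_alt
  simp only []
  rw [rel_eq]
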